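-- pv_equiv track=rewrite | github.com/irji/PythonProjects | WorkScripts/IntersectConvert/Convert_Ixf.py | parce_to_dates
-- ===== SOURCE A (Python) =====
-- def parce_to_dates(lines):
--     _dates = []
--     _substr = ""
--
--     for ln in lines[:-1]: #бегаем до предпоследнего элемента
--         if ln.__contains__("DATE"):
--             _dates.append(_substr)
--             _substr = ""
--         _substr = _substr + ln
--     else: #если последний
--         _dates.append(_substr)
--
--     return _dates
-- ===== SOURCE B (Python) =====
-- def parce_to_dates(lines):
--     body = lines[:-1]
--     starts = [i for i, ln in enumerate(body) if "DATE" in ln]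
--     groups = []
--     prev = 0
--     for s in starts:
--         groups.append("".join(body[prev:s]))
--         prev = s
--     groups.append("".join(body[prev:]))
--     return groups
-- ===== Notes on version B (the rewrite author's own statement) =====
-- stated objective: alternative
-- what changed: A's single accumulate-and-emit scan (growing a string, emitting it at each DATE line) is replaced by a two-pass decomposition: first collect the indices of DATE boundary lines, then emit one ''.join of each slice between consecutive boundaries plus the leading and trailing slices.
import Mathlib
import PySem

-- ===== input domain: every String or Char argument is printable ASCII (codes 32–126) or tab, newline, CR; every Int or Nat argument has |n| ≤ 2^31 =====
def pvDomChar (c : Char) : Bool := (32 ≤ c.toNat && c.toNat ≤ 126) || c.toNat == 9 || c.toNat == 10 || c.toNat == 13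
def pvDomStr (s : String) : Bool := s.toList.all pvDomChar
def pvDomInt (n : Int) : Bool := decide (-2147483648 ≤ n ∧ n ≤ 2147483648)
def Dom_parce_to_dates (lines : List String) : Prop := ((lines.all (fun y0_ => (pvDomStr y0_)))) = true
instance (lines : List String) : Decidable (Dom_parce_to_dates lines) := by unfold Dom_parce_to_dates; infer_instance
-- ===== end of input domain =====

-- B replaces A's accumulate-and-emit scan by an index-build pass (DATE boundary positions) followed by a
-- slice-and-join pass; objective: alternative decomposition, same asymptotic cost.

-- ===== PORT A =====
-- for ln in lines[:-1]: if "DATE" in ln: emit substr, reset; substr += ln; finally emit substr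
def parce_to_dates (lines : List String) : List String :=
  let st := (PySem.List.slice lines none (some (-1))).foldl
      (fun (st : List String × String) ln =>
        let st := if PySem.Str.isIn "DATE" ln then (st.1 ++ [st.2], "") else st
        (st.1, st.2 ++ ln))
      ([], "")
  st.1 ++ [st.2]

-- ===== PORT B =====
-- body = lines[:-1]; starts = [i for i,ln in enumerate(body) if "DATE" in ln];
-- then one join-slice per boundary, plus the final tail slice
def parce_to_dates_alt (lines : List String) : List String :=
  let body := PySem.List.slice lines none (some (-1))
  let starts := ((PySem.List.enumerate body).filter
      (fun p => PySem.Str.isIn "DATE" p.2)).map (·.1)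
  let st := starts.foldl
      (fun (st : List String × Int) s =>
        (st.1 ++ [PySem.Str.join "" (PySem.List.slice body (some st.2) (some s))], s))
      ([], 0)
  st.1 ++ [PySem.Str.join "" (PySem.List.slice body (some st.2) none)]

-- ===== PRECONDITION & SPEC =====
def Spec_parce_to_dates (lines : List String) (out : List String) : Prop := out = parce_to_dates_alt lines
instance (lines : List String) (out : List String) : Decidable (Spec_parce_to_dates lines out) := by unfold Spec_parce_to_dates; infer_instance

-- ===== CLAIM (what is proved, stated in full; the proofs are below) =====
def Claim_equal_parce_to_dates : Prop := ∀ (lines : List String), Dom_parce_to_dates lines → Spec_parce_to_dates lines (parce_to_dates lines)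

-- ===== LEMMAS AND PROOFS =====

-- the common recursive description of the grouping both programs compute
def pvGroups (sub : String) : List String → List String
  | [] => [sub]
  | ln :: rest => if PySem.Str.isIn "DATE" ln then sub :: pvGroups ln rest else pvGroups (sub ++ ln) rest

theorem pvJoin0_nil : PySem.Str.join "" ([] : List String) = "" := by
  apply String.toList_inj.mp
  simp [PySem.Str.toList_join, PySem.Chars.join_nil]

theorem pvJoin0_cons (x : String) (l : List String) :
    PySem.Str.join "" (x :: l) = x ++ PySem.Str.join "" l := by
  apply String.toList_inj.mp
  cases l with
  | nil => simp [PySem.Str.toList_join, PySem.Chars.join_singleton, PySem.Chars.join_nil]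
  | cons y r => simp [PySem.Str.toList_join, PySem.Chars.join_cons_cons]

theorem pvJoin0_append (l1 l2 : List String) :
    PySem.Str.join "" (l1 ++ l2) = PySem.Str.join "" l1 ++ PySem.Str.join "" l2 := by
  induction l1 with
  | nil => simp [pvJoin0_nil]
  | cons x r ih => simp [pvJoin0_cons, ih, String.append_assoc]

-- A's loop computes pvGroups
theorem pvA_loop (body : List String) (acc : List String) (sub : String) :
    (body.foldl
      (fun (st : List String × String) ln =>
        let st := if PySem.Str.isIn "DATE" ln then (st.1 ++ [st.2], "") else st
        (st.1, st.2 ++ ln)) (acc, sub)).1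
    ++ [(body.foldl
      (fun (st : List String × String) ln =>
        let st := if PySem.Str.isIn "DATE" ln then (st.1 ++ [st.2], "") else st
        (st.1, st.2 ++ ln)) (acc, sub)).2]
    = acc ++ pvGroups sub body := by
  induction body generalizing acc sub with
  | nil => simp [pvGroups]
  | cons ln rest ih =>
    by_cases h : PySem.Str.isIn "DATE" ln
    · simp only [List.foldl_cons, h, if_true]
      rw [show ("" : String) ++ ln = ln from by simp]
      rw [ih]
      simp only [pvGroups, h, if_true]
      simp
    · simp only [List.foldl_cons, h, Bool.false_eq_true, if_false]
      rw [ih]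
      simp only [pvGroups, h, Bool.false_eq_true, if_false]

-- B's boundary indices, with an arbitrary enumeration start
def pvStarts (s₀ : Int) (body : List String) : List Int :=
  ((PySem.List.enumerate body s₀).filter (fun p => PySem.Str.isIn "DATE" p.2)).map (·.1)

theorem pvStarts_cons (s₀ : Int) (ln : String) (rest : List String) :
    pvStarts s₀ (ln :: rest) =
      if PySem.Str.isIn "DATE" ln then s₀ :: pvStarts (s₀ + 1) rest else pvStarts (s₀ + 1) rest := by
  simp only [pvStarts, PySem.List.enumerate_cons, List.filter_cons]
  split <;> simp

-- B's loop over the boundary indices of `body`, run inside full = pre ++ body with the pending chunk full[k:len pre]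
theorem pvB_loop (body : List String) (pre out : List String) (k : Nat) (hk : k ≤ pre.length) :
    (let st := (pvStarts (pre.length : Int) body).foldl
        (fun (st : List String × Int) s =>
          (st.1 ++ [PySem.Str.join "" (PySem.List.slice (pre ++ body) (some st.2) (some s))], s))
        (out, (k : Int))
     st.1 ++ [PySem.Str.join "" (PySem.List.slice (pre ++ body) (some st.2) none)])
    = out ++ pvGroups (PySem.Str.join "" (pre.drop k)) body := by
  induction body generalizing pre out k with
  | nil =>
    simp only [pvStarts, PySem.List.enumerate_nil, List.filter_nil, List.map_nil, List.foldl_nil,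
      List.append_nil, PySem.List.slice_from_natCast, pvGroups]
  | cons ln rest ih =>
    have hfull : pre ++ ln :: rest = (pre ++ [ln]) ++ rest := by simp
    have hslice : PySem.List.slice (pre ++ ln :: rest) (some (k : Int)) (some (pre.length : Int))
        = pre.drop k := by
      rw [PySem.List.slice_natCast, List.drop_append_of_le_length hk,
        List.take_left' (by simp [List.length_drop])]
    by_cases h : PySem.Str.isIn "DATE" ln
    · rw [pvStarts_cons, if_pos h]
      simp only [List.foldl_cons, hslice]
      rw [show ((pre.length : Int) + 1) = (((pre ++ [ln]).length : Nat) : Int) from by simp]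
      rw [hfull]
      rw [ih (pre ++ [ln]) (out ++ [PySem.Str.join "" (pre.drop k)]) pre.length (by simp)]
      have hdrop : (pre ++ [ln]).drop pre.length = [ln] := List.drop_left' rfl
      rw [hdrop, pvJoin0_cons, pvJoin0_nil]
      simp only [pvGroups, h, if_true]
      simp
    · rw [pvStarts_cons, if_neg h]
      rw [show ((pre.length : Int) + 1) = (((pre ++ [ln]).length : Nat) : Int) from by simp]
      rw [hfull]
      rw [ih (pre ++ [ln]) out k (by simp; omega)]
      have hdrop : (pre ++ [ln]).drop k = pre.drop k ++ [ln] :=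
        List.drop_append_of_le_length hk
      rw [hdrop, pvJoin0_append, pvJoin0_cons, pvJoin0_nil]
      simp only [pvGroups, h, Bool.false_eq_true, if_false]
      simp

-- ===== VERDICT (by name: the statement is the Claim_ definition above) =====
theorem parce_to_dates_spec : Claim_equal_parce_to_dates := by
  intro lines _
  unfold Spec_parce_to_dates parce_to_dates parce_to_dates_alt
  set body := PySem.List.slice lines none (some (-1)) with hbody
  have hA := pvA_loop body [] ""
  have hB := pvB_loop body [] [] 0 (by simp)
  simp only [List.nil_append, List.drop_nil, pvJoin0_nil] at hA hB
  rw [hA]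
  rw [← hB]
  simp only [pvStarts, Int.natCast_zero]
  rfl
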